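-- pv_equiv track=rewrite | github.com/rishi0322/srm_coding_round_template | q1.py | first_stable_character
-- ===== SOURCE A (Python) =====
-- def first_stable_character(s):
--     """
--     Find the first stable character in the string.
--
--     A character is stable if:
--     1. It appears at least twice
--     2. All occurrences are in one continuous group
--
--     Args:
--         s (str): Input string
--
--     Returns:
--         str or None: First stable character, or None if no stable character exists
--
--     Examples:
--         >>> first_stable_character("abccba")
--         'c'
--         >>> first_stable_character("abc")
--         None
--         >>> first_stable_character("a")
--         None
--     """
--     if len(s) == 0:
--         return None
--     i = 0
--     while i < len(s):
--         char = s[i]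
--         count = 1
--         j = i + 1
--         while j < len(s) and s[j] == char:
--             count = count + 1
--             j = j + 1
--         appears_later = False
--         for k in range(j, len(s)):
--             if s[k] == char:
--                 appears_later = True
--                 break
--         if count >= 2 and not appears_later:
--             return char
--         i = i + 1
--     return None
-- ===== SOURCE B (Python) =====
-- def first_stable_character(s):
--     # One pass over maximal runs using a precomputed last-occurrence index per char.
--     last = {c: i for i, c in enumerate(s)}
--     n = len(s)
--     i = 0
--     while i < n:
--         j = i + 1
--         while j < n and s[j] == s[i]:
--             j += 1
--         if j - i >= 2 and last[s[i]] == j - 1: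
--             return s[i]
--         i = j
--     return None
-- ===== Notes on version B (the rewrite author's own statement) =====
-- stated objective: faster
-- what changed: Replaced the per-index rescan (inner run count restarted at every index plus a linear appears-later scan) by a precomputed last-occurrence dict and a single pass over maximal runs, testing 'no later occurrence' as last[char] == run_end.
import Mathlib
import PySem

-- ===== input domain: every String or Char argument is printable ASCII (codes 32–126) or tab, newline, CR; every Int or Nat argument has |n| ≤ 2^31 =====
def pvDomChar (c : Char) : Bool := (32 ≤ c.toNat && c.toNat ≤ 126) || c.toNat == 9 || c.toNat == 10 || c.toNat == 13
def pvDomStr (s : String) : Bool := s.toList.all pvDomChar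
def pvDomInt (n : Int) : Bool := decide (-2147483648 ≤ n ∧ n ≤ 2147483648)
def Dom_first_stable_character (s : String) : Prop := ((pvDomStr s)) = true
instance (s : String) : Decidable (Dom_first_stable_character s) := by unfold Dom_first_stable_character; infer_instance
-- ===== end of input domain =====

-- B replaces A's per-index rescans by a last-occurrence dict and one pass over maximal runs (measured asymptotically faster).

-- ===== PORT A =====
-- inner 'for k in range(j, len(s)): if s[k] == char: appears_later = True; break'
def pvALater (ch : Char) : List Char → Bool
  | [] => false
  | c :: t => if c = ch then true else pvALater ch t

-- inner 'while j < len(s) and s[j] == char: count += 1; j += 1' (returns added count and remaining suffix)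
def pvARun (ch : Char) : List Char → Nat × List Char
  | [] => (0, [])
  | c :: t => if c = ch then ((pvARun ch t).1 + 1, (pvARun ch t).2) else (0, c :: t)

-- outer 'while i < len(s)', i advancing by 1 = recursion on the suffix at i
def pvALoop : List Char → Option Char
  | [] => none
  | c :: t =>
      if 2 ≤ 1 + (pvARun c t).1 ∧ pvALater c (pvARun c t).2 = false then some c
      else pvALoop t

def first_stable_character (s : String) : Option String :=
  if s.toList.length = 0 then none
  else (pvALoop s.toList).map (fun c => String.ofList [c])

-- ===== PORT B =====
-- 'last = {c: i for i, c in enumerate(s)}'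
def pvBLast (l : List Char) : PySem.Dict Char Int :=
  (PySem.List.enumerate l).foldl (fun d ic => d.insert ic.2 ic.1) PySem.Dict.empty

-- 'while j < n and s[j] == s[i]: j += 1' (j absolute; returns final j and remaining suffix)
def pvBRun (ch : Char) (j : Nat) : List Char → Nat × List Char
  | [] => (j, [])
  | c :: t => if c = ch then pvBRun ch (j + 1) t else (j, c :: t)

theorem pvBRun_len_le (ch : Char) : ∀ (t : List Char) (j : Nat), (pvBRun ch j t).2.length ≤ t.length := by
  intro t
  induction t with
  | nil => intro j; simp [pvBRun]
  | cons c t ih =>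
      intro j
      by_cases h : c = ch
      · simpa [pvBRun, h] using Nat.le_succ_of_le (ih (j + 1))
      · simp [pvBRun, h]

-- outer 'while i < n', i jumping to j = recursion on the suffix after the run
def pvBLoop (last : PySem.Dict Char Int) : Nat → List Char → Option Char
  | _, [] => none
  | i, c :: t =>
      if 2 ≤ (pvBRun c (i + 1) t).1 - i ∧ last.getD c (-1) = ((pvBRun c (i + 1) t).1 : Int) - 1
      then some c
      else pvBLoop last (pvBRun c (i + 1) t).1 (pvBRun c (i + 1) t).2
  termination_by _ l => l.length
  decreasing_by exact Nat.lt_succ_of_le (pvBRun_len_le c t (i + 1))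

def first_stable_character_alt (s : String) : Option String :=
  (pvBLoop (pvBLast s.toList) 0 s.toList).map (fun c => String.ofList [c])

-- ===== PRECONDITION & SPEC =====
def Spec_first_stable_character (s : String) (out : Option String) : Prop := out = first_stable_character_alt s
instance (s : String) (out : Option String) : Decidable (Spec_first_stable_character s out) := by unfold Spec_first_stable_character; infer_instance

-- ===== CLAIM (what is proved, stated in full; the proofs are below) =====
def Claim_equal_first_stable_character : Prop := ∀ (s : String), Dom_first_stable_character s → Spec_first_stable_character s (first_stable_character s)

-- ===== LEMMAS AND PROOFS =====

theorem pvALater_eq_true_iff (ch : Char) : ∀ l : List Char, pvALater ch l = true ↔ ch ∈ l := by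
  intro l
  induction l with
  | nil => simp [pvALater]
  | cons c t ih =>
      by_cases h : c = ch
      · simp [pvALater, h]
      · simp only [pvALater, if_neg h, ih, List.mem_cons]
        exact ⟨Or.inr, fun hm => hm.elim (fun he => absurd he.symm h) id⟩

theorem pvARun_decomp (ch : Char) : ∀ t : List Char, t = List.replicate (pvARun ch t).1 ch ++ (pvARun ch t).2 := by
  intro t
  induction t with
  | nil => simp [pvARun]
  | cons c t ih =>
      by_cases h : c = ch
      · subst h
        simp only [pvARun]
        exact congrArg (c :: ·) ih
      · simp [pvARun, h]

theorem pvARun_head_ne (ch : Char) : ∀ t x xt, (pvARun ch t).2 = x :: xt → x ≠ ch := by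
  intro t
  induction t with
  | nil => intro x xt h; simp [pvARun] at h
  | cons c t ih =>
      intro x xt h
      by_cases hc : c = ch
      · exact ih x xt (by simpa [pvARun, hc] using h)
      · simp [pvARun, hc] at h
        exact h.1 ▸ hc

theorem pvARun_of_head_ne (ch : Char) (r : List Char)
    (hr : ∀ x xt, r = x :: xt → x ≠ ch) :
    ∀ cnt, pvARun ch (List.replicate cnt ch ++ r) = (cnt, r) := by
  intro cnt
  induction cnt with
  | zero =>
      cases r with
      | nil => simp [pvARun]
      | cons x xt => simp [pvARun, hr x xt rfl]
  | succ n ih => simp [List.replicate_succ, pvARun, ih]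

theorem pvBRun_eq (ch : Char) : ∀ (t : List Char) (j : Nat),
    pvBRun ch j t = (j + (pvARun ch t).1, (pvARun ch t).2) := by
  intro t
  induction t with
  | nil => intro j; simp [pvBRun, pvARun]
  | cons c t ih =>
      intro j
      by_cases h : c = ch
      · simp [pvBRun, pvARun, h, ih (j + 1)]; omega
      · simp [pvBRun, pvARun, h]

-- last index of ch in a list (proof-side characterisation of Source B's dict)
def pvLastIdx (ch : Char) : List Char → Option Nat
  | [] => none
  | c :: t =>
      match pvLastIdx ch t with
      | some m => some (m + 1)
      | none => if c = ch then some 0 else none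

theorem pvLastIdx_none_iff (ch : Char) : ∀ l : List Char, pvLastIdx ch l = none ↔ ch ∉ l := by
  intro l
  induction l with
  | nil => simp [pvLastIdx]
  | cons c t ih =>
      cases hm : pvLastIdx ch t with
      | some m =>
          have hmem : ch ∈ t := by
            by_contra hn
            rw [ih.mpr hn] at hm
            cases hm
          simp [pvLastIdx, hm, hmem]
      | none =>
          have hnt : ch ∉ t := ih.mp hm
          by_cases h : c = ch
          · simp [pvLastIdx, hm, h]
          · constructor
            · intro _
              simp only [List.mem_cons, not_or]
              exact ⟨fun he => h he.symm, hnt⟩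
            · intro _
              simp [pvLastIdx, hm, h]

theorem pvLastIdx_append (ch : Char) : ∀ a b : List Char,
    pvLastIdx ch (a ++ b) =
      ((pvLastIdx ch b).map (fun m => a.length + m)).or (pvLastIdx ch a) := by
  intro a b
  induction a with
  | nil => cases h : pvLastIdx ch b <;> simp [h, pvLastIdx]
  | cons c a ih =>
      cases hb : pvLastIdx ch b with
      | none =>
          simp only [hb, Option.map_none, Option.none_or] at ih ⊢
          cases ha : pvLastIdx ch a <;>
            simp [pvLastIdx, List.cons_append, ih, ha]
      | some m =>
          simp only [hb, Option.map_some, Option.some_or] at ih ⊢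
          simp [pvLastIdx, List.cons_append, ih, List.length_cons]; omega

theorem pvLastIdx_cons_self (ch : Char) (l : List Char) :
    pvLastIdx ch (ch :: l) = some ((pvLastIdx ch l).elim 0 (· + 1)) := by
  cases h : pvLastIdx ch l <;> simp [pvLastIdx, h]

theorem pvLastIdx_run (ch : Char) : ∀ cnt, pvLastIdx ch (ch :: List.replicate cnt ch) = some cnt := by
  intro cnt
  induction cnt with
  | zero => simp [pvLastIdx]
  | succ n ih =>
      rw [List.replicate_succ, pvLastIdx_cons_self]
      rw [show pvLastIdx ch (ch :: List.replicate n ch) = some n from ih]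
      simp

theorem pvLastIdx_full (ch : Char) (pre r : List Char) (cnt : Nat) :
    pvLastIdx ch (pre ++ ((ch :: List.replicate cnt ch) ++ r))
      = some (pre.length + cnt) ↔ ch ∉ r := by
  constructor
  · intro h
    by_contra hmem
    have hne : pvLastIdx ch r ≠ none := fun hn => (pvLastIdx_none_iff ch r).mp hn hmem
    obtain ⟨m, hm⟩ := Option.ne_none_iff_exists'.mp hne
    have hmid : pvLastIdx ch ((ch :: List.replicate cnt ch) ++ r)
        = some ((ch :: List.replicate cnt ch).length + m) := by
      rw [pvLastIdx_append, hm]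
      simp
    rw [pvLastIdx_append, hmid] at h
    simp at h
    omega
  · intro hmem
    have hr0 : pvLastIdx ch r = none := (pvLastIdx_none_iff ch r).mpr hmem
    have hmid : pvLastIdx ch ((ch :: List.replicate cnt ch) ++ r) = some cnt := by
      rw [pvLastIdx_append, hr0, pvLastIdx_run]
      simp
    rw [pvLastIdx_append, hmid]
    simp

-- Source B's dict lookup agrees with pvLastIdx
theorem pvBLast_get? (ch : Char) : ∀ l : List Char,
    (pvBLast l).get? ch = (pvLastIdx ch l).map (fun m => Int.ofNat m) := by
  intro l
  induction l using List.reverseRecOn with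
  | nil => simp [pvBLast, PySem.List.enumerate, PySem.Dict.get?_empty, pvLastIdx]
  | append_singleton a x ih =>
      have he : PySem.List.enumerate (a ++ [x]) 0
          = PySem.List.enumerate a 0 ++ [((a.length : Int), x)] := by
        simpa using PySem.List.enumerate_append a [x] 0
      have hfold : pvBLast (a ++ [x]) = (pvBLast a).insert x (a.length : Int) := by
        simp [pvBLast, he, List.foldl_append]
      rw [hfold, PySem.Dict.get?_insert]
      rw [pvLastIdx_append]
      by_cases h : ch = x
      · simp [pvLastIdx, h]
      · have h' : x ≠ ch := fun hx => h hx.symm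
        simp [pvLastIdx, h, h', ih]

-- run-skip: when the check fails at a run's start it fails at every position of the run
theorem pvALoop_skip_run (ch : Char) : ∀ (cnt : Nat) (r : List Char),
    (∀ x xt, r = x :: xt → x ≠ ch) → ch ∈ r →
    pvALoop (List.replicate cnt ch ++ r) = pvALoop r := by
  intro cnt
  induction cnt with
  | zero => intro r _ _; simp
  | succ n ih =>
      intro r hr hmem
      have hrun := pvARun_of_head_ne ch r hr n
      have hlater : pvALater ch r = true := (pvALater_eq_true_iff ch r).mpr hmem
      simp only [List.replicate_succ, List.cons_append, pvALoop, hrun, hlater]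
      rw [if_neg (by simp)]
      exact ih r hr hmem

-- main loop correspondence
theorem pvLoop_main : ∀ (n : Nat) (rest pre : List Char), rest.length ≤ n →
    pvBLoop (pvBLast (pre ++ rest)) pre.length rest = pvALoop rest := by
  intro n
  induction n with
  | zero =>
      intro rest pre h
      have : rest = [] := List.eq_nil_of_length_eq_zero (Nat.le_zero.mp h)
      subst this; simp [pvBLoop, pvALoop]
  | succ n ih =>
      intro rest pre hlen
      cases rest with
      | nil => rw [pvBLoop, pvALoop]
      | cons c t =>
          set cnt := (pvARun c t).1 with hcnt
          set r := (pvARun c t).2 with hrdef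
          have hdec : t = List.replicate cnt c ++ r := pvARun_decomp c t
          have hhead : ∀ x xt, r = x :: xt → x ≠ c := fun x xt hx => pvARun_head_ne c t x xt (hrdef ▸ hx)
          have hbrun : pvBRun c (pre.length + 1) t = (pre.length + 1 + cnt, r) := pvBRun_eq c t (pre.length + 1)
          have hfull : pre ++ (c :: t) = pre ++ ((c :: List.replicate cnt c) ++ r) := by
            rw [List.cons_append]
            exact congrArg (pre ++ c :: ·) hdec
          have hgetD : (pvBLast (pre ++ (c :: t))).getD c (-1)
              = ((pvLastIdx c (pre ++ (c :: t))).map (fun m => Int.ofNat m)).getD (-1) := by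
            rw [PySem.Dict.getD_eq_get?_getD, pvBLast_get?]
          have hcond : ((pvBLast (pre ++ (c :: t))).getD c (-1) = ((pre.length + 1 + cnt : Nat) : Int) - 1)
              ↔ c ∉ r := by
            rw [hgetD]
            have hiff := pvLastIdx_full c pre r cnt
            rw [hfull]
            cases hidx : pvLastIdx c (pre ++ ((c :: List.replicate cnt c) ++ r)) with
            | none =>
                rw [pvLastIdx_none_iff] at hidx
                exact absurd (by simp : c ∈ pre ++ ((c :: List.replicate cnt c) ++ r)) hidx
            | some m =>
                rw [hidx] at hiff
                simp only [Option.map_some, Option.getD_some]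
                constructor
                · intro hm
                  apply hiff.mp
                  congr 1
                  simp only [Int.ofNat_eq_natCast] at hm
                  omega
                · intro hmem
                  have hm : m = pre.length + cnt := by
                    have := hiff.mpr hmem
                    injection this
                  rw [hm]
                  simp only [Int.ofNat_eq_natCast]
                  omega
          have hlater : (pvALater c r = false) ↔ c ∉ r := by
            rw [← pvALater_eq_true_iff c r]
            cases pvALater c r <;> simp
          rw [pvBLoop, pvALoop]
          simp only [hbrun, ← hcnt, ← hrdef]
          have harith : pre.length + 1 + cnt - pre.length = 1 + cnt := by omega
          by_cases hc : 2 ≤ 1 + cnt ∧ c ∉ r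
          · rw [if_pos (by rw [harith]; exact ⟨hc.1, hcond.mpr hc.2⟩),
              if_pos ⟨hc.1, hlater.mpr hc.2⟩]
          · rw [if_neg (fun hh => by rw [harith] at hh; exact hc ⟨hh.1, hcond.mp hh.2⟩),
              if_neg (fun hh => hc ⟨hh.1, hlater.mp hh.2⟩)]
            have hskip : pvALoop t = pvALoop r := by
              rcases Nat.eq_zero_or_pos cnt with h0 | hpos
              · rw [hdec, h0]; simp
              · have hmem : c ∈ r := by
                  by_contra hnm
                  exact hc ⟨by omega, hnm⟩
                rw [hdec]; exact pvALoop_skip_run c cnt r hhead hmem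
            have hlen2 : r.length ≤ n := by
              have ht : t.length ≤ n := by simp only [List.length_cons] at hlen; omega
              have : r.length ≤ t.length := by rw [hdec]; simp
              omega
            have hpre : pre.length + 1 + cnt = (pre ++ c :: List.replicate cnt c).length := by
              simp
              omega
            have hIH := ih r (pre ++ c :: List.replicate cnt c) hlen2
            rw [show (pre ++ c :: List.replicate cnt c) ++ r = pre ++ (c :: t) from by
              rw [hfull, List.append_assoc, List.cons_append]] at hIH
            rw [hskip, hpre, hIH]

-- ===== VERDICT (by name: the statement is the Claim_ definition above) =====
theorem first_stable_character_spec : Claim_equal_first_stable_character := by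
  intro s _
  unfold Spec_first_stable_character first_stable_character first_stable_character_alt
  have hmain := pvLoop_main s.toList.length s.toList [] (le_refl _)
  simp only [List.nil_append, List.length_nil] at hmain
  by_cases h : s.toList.length = 0
  · have : s.toList = [] := List.eq_nil_of_length_eq_zero h
    rw [if_pos h, this] at *
    simp [pvBLoop]
  · rw [if_neg h, hmain]
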